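-- pv_equiv track=rewrite | github.com/MicheleSpecchia/probity | src/pmx/portfolio/valuation.py | _normalize_warning_records
-- ===== SOURCE A (Python) =====
-- from collections.abc import Mapping, Sequence
--
-- def _normalize_warning_records(records: Sequence[Mapping[str, str]]) -> tuple[dict[str, str], ...]:
--     deduped: dict[tuple[str, str, str, str], dict[str, str]] = {}
--     for record in records:
--         code = str(record.get("code", "")).strip() or "unknown_warning"
--         message = str(record.get("message", "")).strip()
--         token_id = str(record.get("token_id", "")).strip()
--         side = str(record.get("side", "")).strip()
--         key = (code, message, token_id, side)
--         payload: dict[str, str] = {"code": code}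
--         if message:
--             payload["message"] = message
--         if token_id:
--             payload["token_id"] = token_id
--         if side:
--             payload["side"] = side
--         deduped[key] = payload
--     sorted_keys = sorted(deduped.keys(), key=lambda item: item)
--     return tuple(deduped[key] for key in sorted_keys)
-- ===== SOURCE B (Python) =====
-- def _normalize_warning_records(records):
--     # Maintain a strictly sorted, duplicate-free list of key tuples by ordered
--     # insertion; then build the payloads in one final pass over that list.
--     keys = []
--     for record in records:
--         code = str(record.get("code", "")).strip() or "unknown_warning"
--         key = (
--             code,
--             str(record.get("message", "")).strip(),
--             str(record.get("token_id", "")).strip(),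
--             str(record.get("side", "")).strip(),
--         )
--         i = 0
--         while i < len(keys) and keys[i] < key:
--             i += 1
--         if i == len(keys) or keys[i] != key:
--             keys.insert(i, key)
--     result = []
--     for code, message, token_id, side in keys:
--         payload = {"code": code}
--         if message:
--             payload["message"] = message
--         if token_id:
--             payload["token_id"] = token_id
--         if side:
--             payload["side"] = side
--         result.append(payload)
--     return tuple(result)
-- ===== Notes on version B (the rewrite author's own statement) =====
-- stated objective: alternative
-- what changed: Replaces A's key->payload dict (dedup by overwrite, then sort the distinct keys and look each payload up) with a strictly sorted duplicate-free list of key tuples maintained by ordered insertion during the single scan, followed by one pass that builds the payloads directly from the keys.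
import Mathlib
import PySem

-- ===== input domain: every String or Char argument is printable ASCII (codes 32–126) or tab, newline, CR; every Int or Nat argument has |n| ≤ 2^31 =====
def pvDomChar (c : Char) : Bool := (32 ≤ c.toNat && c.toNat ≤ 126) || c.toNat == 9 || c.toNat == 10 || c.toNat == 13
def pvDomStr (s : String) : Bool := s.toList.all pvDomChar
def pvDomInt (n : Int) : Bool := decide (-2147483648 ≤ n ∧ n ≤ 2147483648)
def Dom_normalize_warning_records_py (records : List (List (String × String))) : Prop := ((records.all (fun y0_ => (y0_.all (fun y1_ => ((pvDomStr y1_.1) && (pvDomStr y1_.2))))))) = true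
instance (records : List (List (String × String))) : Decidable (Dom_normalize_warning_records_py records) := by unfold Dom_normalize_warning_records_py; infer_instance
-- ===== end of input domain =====

-- B replaces A's key→payload dict (dedup by overwrite, then sort the distinct keys and look payloads up)
-- with a strictly sorted duplicate-free key list maintained by ordered insertion, then one payload-building pass
-- (alternative decomposition; not claimed faster).

-- ===== PORT A =====
-- A's normalized key tuple (code, message, token_id, side); code defaults to "unknown_warning"
def pvKey (record : List (String × String)) : String × String × String × String :=
  let code0 := PySem.Str.strip ((PySem.Dict.ofList record).getD "code" "")
  let code := if code0 = "" then "unknown_warning" else code0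
  (code,
   PySem.Str.strip ((PySem.Dict.ofList record).getD "message" ""),
   PySem.Str.strip ((PySem.Dict.ofList record).getD "token_id" ""),
   PySem.Str.strip ((PySem.Dict.ofList record).getD "side" ""))

-- A's payload dict built from the key values
def pvPayload (k : String × String × String × String) : List (String × String) :=
  [("code", k.1)]
    ++ (if k.2.1 ≠ "" then [("message", k.2.1)] else [])
    ++ (if k.2.2.1 ≠ "" then [("token_id", k.2.2.1)] else [])
    ++ (if k.2.2.2 ≠ "" then [("side", k.2.2.2)] else [])

-- Python's tuple-of-strings comparison, as a lexicographic sort key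
def pvLexKey (k : String × String × String × String) :
    Lex (String × Lex (String × Lex (String × String))) :=
  toLex (k.1, toLex (k.2.1, toLex (k.2.2.1, k.2.2.2)))

def normalize_warning_records_py (records : List (List (String × String))) : List (List (String × String)) :=
  let deduped := records.foldl (fun d record =>
      let key := pvKey record
      let payload := pvPayload key
      d.insert key payload) PySem.Dict.empty
  let sorted_keys := PySem.List.sorted (PySem.Dict.keys deduped) pvLexKey false
  sorted_keys.map (fun k => (PySem.Dict.get? deduped k).getD [])

-- ===== PORT B =====
-- B's inner while/insert loop: ordered insertion into a strictly sorted list, skipping duplicates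
def pvBIns (key : String × String × String × String) :
    List (String × String × String × String) → List (String × String × String × String)
  | [] => [key]
  | x :: t =>
    if pvLexKey x < pvLexKey key then x :: pvBIns key t
    else if x = key then x :: t
    else key :: x :: t

def normalize_warning_records_py_alt (records : List (List (String × String))) : List (List (String × String)) :=
  let keys := records.foldl (fun ks record => pvBIns (pvKey record) ks) []
  keys.map (fun k =>
    match k with
    | (code, message, token_id, side) =>
      ("code", code)
        :: ((if message ≠ "" then [("message", message)] else [])
          ++ (if token_id ≠ "" then [("token_id", token_id)] else [])
          ++ (if side ≠ "" then [("side", side)] else [])))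

-- ===== PRECONDITION & SPEC =====
def Spec_normalize_warning_records_py (records : List (List (String × String))) (out : List (List (String × String))) : Prop := out = normalize_warning_records_py_alt records
instance (records : List (List (String × String))) (out : List (List (String × String))) : Decidable (Spec_normalize_warning_records_py records out) := by unfold Spec_normalize_warning_records_py; infer_instance

-- ===== CLAIM (what is proved, stated in full; the proofs are below) =====
def Claim_equal_normalize_warning_records_py : Prop := ∀ (records : List (List (String × String))), Dom_normalize_warning_records_py records → Spec_normalize_warning_records_py records (normalize_warning_records_py records)

-- ===== LEMMAS AND PROOFS =====

theorem pvLexKey_inj : Function.Injective pvLexKey := by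
  intro a b h
  obtain ⟨a1, a2, a3, a4⟩ := a
  obtain ⟨b1, b2, b3, b4⟩ := b
  simpa [pvLexKey, Prod.ext_iff] using h

theorem pvBIns_mem (k x) (l : List (String × String × String × String)) :
    x ∈ pvBIns k l ↔ x = k ∨ x ∈ l := by
  induction l with
  | nil => simp [pvBIns]
  | cons y t ih =>
    simp only [pvBIns]
    split_ifs with h1 h2
    · simp only [List.mem_cons, ih]; tauto
    · subst h2; simp only [List.mem_cons]; tauto
    · simp only [List.mem_cons]

theorem pvBIns_pairwise (k) (l : List (String × String × String × String))
    (hl : l.Pairwise (fun a b => pvLexKey a < pvLexKey b)) :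
    (pvBIns k l).Pairwise (fun a b => pvLexKey a < pvLexKey b) := by
  induction l with
  | nil => simp [pvBIns]
  | cons y t ih =>
    rcases List.pairwise_cons.mp hl with ⟨hy, ht⟩
    by_cases h1 : pvLexKey y < pvLexKey k
    · simp only [pvBIns, if_pos h1]
      refine List.pairwise_cons.mpr ⟨?_, ih ht⟩
      intro x hx
      rcases (pvBIns_mem k x t).mp hx with rfl | hx
      · exact h1
      · exact hy x hx
    · by_cases h2 : y = k
      · subst h2; simpa only [pvBIns, if_neg h1, if_pos rfl] using hl
      · have hky : pvLexKey k < pvLexKey y :=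
          lt_of_le_of_ne (le_of_not_gt h1) (fun e => h2 (pvLexKey_inj e).symm)
        simp only [pvBIns, if_neg h1, if_neg h2]
        refine List.pairwise_cons.mpr ⟨?_, hl⟩
        intro x hx
        rcases List.mem_cons.mp hx with rfl | hx
        · exact hky
        · exact lt_trans hky (hy x hx)

theorem pvFoldB_pairwise (kl : List (String × String × String × String))
    (acc : List (String × String × String × String))
    (hacc : acc.Pairwise (fun a b => pvLexKey a < pvLexKey b)) :
    (kl.foldl (fun ks k => pvBIns k ks) acc).Pairwise (fun a b => pvLexKey a < pvLexKey b) := by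
  induction kl generalizing acc with
  | nil => exact hacc
  | cons k t ih => exact ih _ (pvBIns_pairwise k acc hacc)

theorem pvFoldB_mem (kl : List (String × String × String × String))
    (acc : List (String × String × String × String)) (x) :
    x ∈ kl.foldl (fun ks k => pvBIns k ks) acc ↔ x ∈ acc ∨ x ∈ kl := by
  induction kl generalizing acc with
  | nil => simp
  | cons k t ih =>
    simp only [List.foldl_cons, ih, pvBIns_mem, List.mem_cons]; tauto

theorem pvFoldB_nodup (kl : List (String × String × String × String)) :
    (kl.foldl (fun ks k => pvBIns k ks) []).Nodup := by
  have := pvFoldB_pairwise kl [] (by simp)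
  exact this.imp (fun {a b} hlt e => absurd (e ▸ hlt) (lt_irrefl _))

-- A's sorted distinct-key list equals B's ordered-insertion list
theorem pvSorted_eq_foldB (kl : List (String × String × String × String)) :
    PySem.List.sorted (PySem.Set.ofList kl) pvLexKey false
      = kl.foldl (fun ks k => pvBIns k ks) [] := by
  refine PySem.List.sorted_eq_of_perm_of_pairwise_lt _ _ pvLexKey ?_ ?_
  · refine (List.perm_ext_iff_of_nodup (pvFoldB_nodup kl) (PySem.Set.nodup_ofList kl)).mpr ?_
    intro x
    rw [pvFoldB_mem, PySem.Set.mem_ofList]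
    simp
  · exact pvFoldB_pairwise kl [] (by simp)

-- the key fact about A's dict: after the fold, every key maps to its payload
theorem pvFoldA_get? (l : List (List (String × String)))
    (d : PySem.Dict (String × String × String × String) (List (String × String)))
    (hd : ∀ k ∈ d.keys, d.get? k = some (pvPayload k)) :
    ∀ k ∈ (l.foldl (fun d record =>
        let key := pvKey record
        let payload := pvPayload key
        d.insert key payload) d).keys,
      (l.foldl (fun d record =>
        let key := pvKey record
        let payload := pvPayload key
        d.insert key payload) d).get? k = some (pvPayload k) := by
  induction l generalizing d with
  | nil => simp only [List.foldl_nil]; exact hd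
  | cons r t ih =>
    simp only [List.foldl_cons]
    refine ih _ (fun k hk => ?_)
    by_cases h : k = pvKey r
    · subst h; simp [PySem.Dict.get?_insert_self]
    · rw [PySem.Dict.get?_insert_of_ne (hne := h)]
      rcases (PySem.Dict.mem_keys_insert _ _ _ _).mp hk with e | hk'
      · exact absurd e h
      · exact hd k hk'

theorem pvBPayload_eq (k : String × String × String × String) :
    (match k with
     | (code, message, token_id, side) =>
       ("code", code)
         :: ((if message ≠ "" then [("message", message)] else [])
           ++ (if token_id ≠ "" then [("token_id", token_id)] else [])
           ++ (if side ≠ "" then [("side", side)] else []))) = pvPayload k := by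
  obtain ⟨a, b, c, d⟩ := k
  simp [pvPayload]

theorem normalize_warning_records_py_eq_alt (records : List (List (String × String))) :
    normalize_warning_records_py records = normalize_warning_records_py_alt records := by
  have hA : normalize_warning_records_py records
      = (PySem.List.sorted ((records.foldl (fun d record =>
            let key := pvKey record
            let payload := pvPayload key
            d.insert key payload) PySem.Dict.empty).keys) pvLexKey false).map
          (fun k => ((records.foldl (fun d record =>
            let key := pvKey record
            let payload := pvPayload key
            d.insert key payload) PySem.Dict.empty).get? k).getD []) := rfl
  have hB : normalize_warning_records_py_alt records
      = (records.foldl (fun ks record => pvBIns (pvKey record) ks) []).map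
          (fun k =>
            match k with
            | (code, message, token_id, side) =>
              ("code", code)
                :: ((if message ≠ "" then [("message", message)] else [])
                  ++ (if token_id ≠ "" then [("token_id", token_id)] else [])
                  ++ (if side ≠ "" then [("side", side)] else []))) := rfl
  rw [hA, hB]
  have hkeys : (records.foldl (fun d record =>
        let key := pvKey record
        let payload := pvPayload key
        d.insert key payload) PySem.Dict.empty).keys
      = PySem.Set.ofList (records.map pvKey) := by
    rw [PySem.Dict.keys_foldl_insert_key (key := pvKey)
      (f := fun d record => pvPayload (pvKey record))]
    simp [PySem.Set.update_nil_left]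
  have hfold : records.foldl (fun ks record => pvBIns (pvKey record) ks) []
      = (records.map pvKey).foldl (fun ks k => pvBIns k ks) [] := by
    rw [List.foldl_map]
  rw [hkeys, pvSorted_eq_foldB, hfold]
  refine List.map_congr_left (fun k hk => ?_)
  have hk' : k ∈ (records.foldl (fun d record =>
        let key := pvKey record
        let payload := pvPayload key
        d.insert key payload) PySem.Dict.empty).keys := by
    rw [hkeys]
    exact (PySem.Set.mem_ofList _ _).mpr (((pvFoldB_mem _ [] k).mp hk).resolve_left (by simp))
  rw [pvFoldA_get? records PySem.Dict.empty (by simp) k hk', pvBPayload_eq]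
  rfl

-- ===== VERDICT (by name: the statement is the Claim_ definition above) =====
theorem normalize_warning_records_py_spec : Claim_equal_normalize_warning_records_py := by
  intro records _
  exact normalize_warning_records_py_eq_alt records
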